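-- pv_equiv track=rewrite | github.com/xli2333/cloneme | scripts/run_data_mining_lxq.py | get_max_streak
-- ===== SOURCE A (Python) =====
-- def get_max_streak(df):
--     max_streaks = {'brother': 0, 'lxg': 0}
--     current_sender = None
--     current_streak = 0
--
--     for sender in df['sender']:
--         if sender not in ['brother', 'lxg']: continue
--
--         if sender == current_sender:
--             current_streak += 1
--         else:
--             if current_sender:
--                 max_streaks[current_sender] = max(max_streaks[current_sender], current_streak)
--             current_sender = sender
--             current_streak = 1
--
--     if current_sender:
--         max_streaks[current_sender] = max(max_streaks[current_sender], current_streak)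
--
--     return max_streaks
-- ===== SOURCE B (Python) =====
-- def get_max_streak(df):
--     max_streaks = {'brother': 0, 'lxg': 0}
--     kept = [s for s in df['sender'] if s in ('brother', 'lxg')]
--     i, n = 0, len(kept)
--     while i < n:
--         j = i + 1
--         while j < n and kept[j] == kept[i]:
--             j += 1
--         s = kept[i]
--         max_streaks[s] = max(max_streaks[s], j - i)
--         i = j
--     return max_streaks
-- ===== Notes on version B (the rewrite author's own statement) =====
-- stated objective: alternative
-- what changed: Replaces A's one-pass state machine (current_sender/current_streak with a trailing flush) by filtering the target senders first and then scanning maximal equal runs with two indices, updating the max per run.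
import Mathlib
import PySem

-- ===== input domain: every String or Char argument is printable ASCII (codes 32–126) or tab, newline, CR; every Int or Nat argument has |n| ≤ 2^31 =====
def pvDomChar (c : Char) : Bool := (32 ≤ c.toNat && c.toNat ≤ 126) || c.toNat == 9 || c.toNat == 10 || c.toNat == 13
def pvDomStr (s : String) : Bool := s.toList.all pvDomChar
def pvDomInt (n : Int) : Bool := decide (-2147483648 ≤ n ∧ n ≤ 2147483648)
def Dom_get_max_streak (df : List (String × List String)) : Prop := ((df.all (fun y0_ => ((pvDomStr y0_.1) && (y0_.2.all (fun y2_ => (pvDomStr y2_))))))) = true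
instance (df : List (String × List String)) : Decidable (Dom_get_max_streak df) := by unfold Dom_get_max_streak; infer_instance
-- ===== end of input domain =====

-- B filters the two target senders first and scans maximal equal runs (two indices) instead of A's
-- current_sender/current_streak state machine with a trailing flush; equal return value, alternative decomposition.

-- ===== PORT A =====
-- sender in ['brother', 'lxg']
def pvTarget (s : String) : Bool := s == "brother" || s == "lxg"

-- {'brother': 0, 'lxg': 0}
def pvInit : PySem.Dict String Int :=
  PySem.Dict.ofList [("brother", 0), ("lxg", 0)]

-- A's for-loop: state (current_sender, current_streak, max_streaks); the [] case is the trailing flush.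
def pvALoop : List String → Option String → Int → PySem.Dict String Int → PySem.Dict String Int
  | [], cur, streak, m =>
      match cur with
      | some c => m.insert c (max (m.getD c 0) streak)
      | none => m
  | s :: rest, cur, streak, m =>
      if !(pvTarget s) then pvALoop rest cur streak m
      else if cur == some s then pvALoop rest cur (streak + 1) m
      else
        match cur with
        | some c => pvALoop rest (some s) 1 (m.insert c (max (m.getD c 0) streak))
        | none => pvALoop rest (some s) 1 m

def get_max_streak (df : List (String × List String)) : List (String × Int) :=
  (pvALoop (((PySem.Dict.mk df).get? "sender").getD []) none 0 pvInit).items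

-- ===== PORT B =====
-- B's outer while: each step consumes one maximal run (inner j-scan = takeWhile/dropWhile) and updates the max.
def pvBLoop (m : PySem.Dict String Int) : List String → PySem.Dict String Int
  | [] => m
  | s :: rest =>
      pvBLoop (m.insert s (max (m.getD s 0) ((rest.takeWhile (· == s)).length + 1)))
        (rest.dropWhile (· == s))
  termination_by l => l.length
  decreasing_by
    simpa using Nat.lt_succ_of_le (List.length_dropWhile_le (· == s) rest)

def get_max_streak_alt (df : List (String × List String)) : List (String × Int) :=
  (pvBLoop pvInit ((((PySem.Dict.mk df).get? "sender").getD []).filter pvTarget)).items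

-- ===== PRECONDITION & SPEC =====
-- A raises KeyError when df has no 'sender' key; Pre_ excludes exactly those inputs.
def Pre_get_max_streak (df : List (String × List String)) : Prop :=
  ((PySem.Dict.mk df).get? "sender").isSome = true
instance (df : List (String × List String)) : Decidable (Pre_get_max_streak df) := by
  unfold Pre_get_max_streak; infer_instance

def pvWitness_get_max_streak : (List (String × List String)) :=
  [("sender", ["brother", "x", "brother", "lxg"])]

def Spec_get_max_streak (df : List (String × List String)) (out : List (String × Int)) : Prop := out = get_max_streak_alt df
instance (df : List (String × List String)) (out : List (String × Int)) : Decidable (Spec_get_max_streak df out) := by unfold Spec_get_max_streak; infer_instance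

-- ===== CLAIM (what is proved, stated in full; the proofs are below) =====
def Claim_equal_get_max_streak : Prop := ∀ (df : List (String × List String)), Dom_get_max_streak df → Pre_get_max_streak df → Spec_get_max_streak df (get_max_streak df)

-- ===== LEMMAS AND PROOFS =====

-- A's `continue` ignores non-target senders: looping over l is looping over l.filter pvTarget.
theorem pvALoop_filter (l : List String) :
    ∀ (cur : Option String) (k : Int) (m : PySem.Dict String Int),
      pvALoop l cur k m = pvALoop (l.filter pvTarget) cur k m := by
  induction l with
  | nil => intro cur k m; rfl
  | cons x l ih =>
      intro cur k m
      by_cases hx : pvTarget x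
      · simp only [pvALoop, hx, List.filter_cons_of_pos hx, Bool.not_true, Bool.false_eq_true,
          if_false]
        split <;> [exact ih _ _ _; split <;> exact ih _ _ _]
      · simp only [pvALoop, List.filter_cons_of_neg (by simpa using hx), (by simpa using hx : pvTarget x = false), if_true, Bool.not_false]
        exact ih _ _ _

-- Core invariant: on an all-target list, A's state machine with open run (s, k) equals
-- B's run scanner after the current run is closed off.
theorem pvALoop_run (l : List String) :
    ∀ (s : String) (k : Int) (m : PySem.Dict String Int),
      (∀ x ∈ l, pvTarget x = true) →
      pvALoop l (some s) k m =
        pvBLoop (m.insert s (max (m.getD s 0) (k + ((l.takeWhile (· == s)).length : Int))))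
          (l.dropWhile (· == s)) := by
  induction l with
  | nil => intro s k m _; simp [pvALoop, pvBLoop]
  | cons x l ih =>
      intro s k m hl
      have hx0 : pvTarget x = true := hl x (List.mem_cons_self ..)
      have hl' : ∀ y ∈ l, pvTarget y = true := fun y hy => hl y (List.mem_cons_of_mem _ hy)
      by_cases hx : x = s
      · subst hx
        simp only [pvALoop, hx0, Bool.not_true, Bool.false_eq_true, if_false,
          (by simp : (some x == some x) = true), if_true]
        rw [ih x (k + 1) m hl']
        simp only [List.takeWhile_cons, List.dropWhile_cons, BEq.refl, if_true,
          List.length_cons]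
        congr 2
        push_cast
        omega
      · have hne : (some s == some x) = false := by
          simp [beq_eq_false_iff_ne, Ne.symm hx]
        simp only [pvALoop, hx0, Bool.not_true, Bool.false_eq_true, if_false, hne]
        rw [ih x 1 (m.insert s (max (m.getD s 0) k)) hl']
        have hxs : (x == s) = false := by simp [beq_eq_false_iff_ne, hx]
        simp only [List.takeWhile_cons, List.dropWhile_cons, hxs, Bool.false_eq_true,
          if_false, List.length_nil, Nat.cast_zero, add_zero, pvBLoop]
        congr 2
        omega

theorem pvALoop_eq_pvBLoop (l : List String) (m : PySem.Dict String Int)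
    (hl : ∀ x ∈ l, pvTarget x = true) :
    pvALoop l none 0 m = pvBLoop m l := by
  cases l with
  | nil => simp [pvALoop, pvBLoop]
  | cons x l =>
      have hx0 : pvTarget x = true := hl x (List.mem_cons_self ..)
      have hl' : ∀ y ∈ l, pvTarget y = true := fun y hy => hl y (List.mem_cons_of_mem _ hy)
      simp only [pvALoop, hx0, Bool.not_true, Bool.false_eq_true, if_false]
      rw [pvALoop_run l x 1 m hl', if_neg (by simp)]
      simp only [pvBLoop]
      congr 2
      omega

-- ===== VERDICT (by name: the statement is the Claim_ definition above) =====
theorem get_max_streak_spec : Claim_equal_get_max_streak := by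
  intro df _ _
  unfold Spec_get_max_streak get_max_streak get_max_streak_alt
  rw [pvALoop_filter]
  rw [pvALoop_eq_pvBLoop]
  intro x hx
  exact List.of_mem_filter hx
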